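-- pv_equiv track=rewrite | github.com/Refs14/Melnikov_Igor-System_Analysis | task2/task.py | count_child
-- ===== SOURCE A (Python) =====
-- def count_child(point, table, found):
--     ans = []
--     new_parents = []
--     for i in range(len(found)):
--         if(table[point][i] == 1 and found[i] == 0):
--             new_parents.append(i)
--             ans.append(i)
--             found[i] = 1
--     for el in new_parents:
--         ans = ans + count_child(el, table, found)
--     return ans
-- ===== SOURCE B (Python) =====
-- def count_child(point, table, found):
--     # Iterative DFS with an explicit stack instead of recursion; performs the same
--     # in-place marking of `found` as the original.
--     ans = []
--     stack = [point]
--     while stack: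
--         node = stack.pop()
--         row = table[node]
--         children = [i for i in range(len(found)) if row[i] == 1 and found[i] == 0]
--         for c in children:
--             found[c] = 1
--         ans.extend(children)
--         for c in reversed(children):
--             stack.append(c)
--     return ans
-- ===== Notes on version B (the rewrite author's own statement) =====
-- stated objective: alternative
-- what changed: The recursive DFS is replaced by an iterative traversal with an explicit stack: children of the popped node are collected by one comprehension over the untouched found, marked, emitted as a block and pushed in reverse, reproducing A's emission order without any recursion.
-- outside the precondition, e.g. on count_child(5, [], []): A returns [], B raises IndexError; on count_child(0, [[0, 0]], [0, 0]): A returns [], B returns []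
import Mathlib
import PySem

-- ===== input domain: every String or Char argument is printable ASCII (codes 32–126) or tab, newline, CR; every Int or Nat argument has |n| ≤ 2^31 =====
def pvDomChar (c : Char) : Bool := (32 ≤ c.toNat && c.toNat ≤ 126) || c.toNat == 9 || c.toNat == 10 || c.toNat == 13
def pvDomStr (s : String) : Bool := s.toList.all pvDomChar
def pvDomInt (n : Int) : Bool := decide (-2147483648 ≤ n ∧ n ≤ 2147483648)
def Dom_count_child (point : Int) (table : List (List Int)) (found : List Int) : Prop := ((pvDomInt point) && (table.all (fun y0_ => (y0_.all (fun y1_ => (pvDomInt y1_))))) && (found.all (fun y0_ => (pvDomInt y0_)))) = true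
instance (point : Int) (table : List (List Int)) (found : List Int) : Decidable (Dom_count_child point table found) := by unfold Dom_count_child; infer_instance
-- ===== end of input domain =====

-- B replaces A's recursion by an explicit-stack traversal with the same emission order;
-- equivalence is about the return value (both Pythons mutate `found` in place identically).

-- ===== PORT A =====
-- Recursive DFS of Source A; the recursion is made total by a fuel parameter
-- (found.length + 1 always exceeds the recursion depth: each deeper call marks a fresh 0 of found).
def countChildA : Nat → Int → List (List Int) → List Int → List Int × List Int
  | 0, _, _, f => ([], f)
  | fuel+1, p, table, f =>
    -- first loop: ans / new_parents / found  (found mutated in place in Python, threaded here)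
    let s := (PySem.List.pyRange 0 f.length 1).foldl
      (fun (st : List Int × List Int × List Int) i =>
        if ((PySem.List.pyGet? table p).bind (fun row => PySem.List.pyGet? row i) == some 1
            && PySem.List.pyGet? st.2.2 i == some 0)
        then (st.1 ++ [i], st.2.1 ++ [i], PySem.List.pySetD st.2.2 i 1)
        else st)
      ([], [], f)
    -- second loop: ans = ans + count_child(el, table, found)
    s.2.1.foldl (fun (st : List Int × List Int) el =>
        let r := countChildA fuel el table st.2
        (st.1 ++ r.1, r.2))
      (s.1, s.2.2)

def count_child (point : Int) (table : List (List Int)) (found : List Int) : List Int :=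
  (countChildA (found.length + 1) point table found).1

-- ===== PORT B =====
-- children = [i for i in range(len(found)) if row[i] == 1 and found[i] == 0]
def childrenB (table : List (List Int)) (p : Int) (f : List Int) : List Int :=
  (PySem.List.pyRange 0 f.length 1).filter
    (fun i => (PySem.List.pyGet? table p).bind (fun row => PySem.List.pyGet? row i) == some 1
              && PySem.List.pyGet? f i == some 0)

-- for c in children: found[c] = 1
def markB (f : List Int) (cs : List Int) : List Int :=
  cs.foldl (fun g c => PySem.List.pySetD g c 1) f

-- while stack: pop, collect children, mark, extend ans, push children reversed
-- (stack top = list head; pushing reversed children then popping from the top = cs ++ st).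
-- Fuel makes the loop total; found.length + 1 exceeds the number of pops (each push marks a fresh 0).
def runB : Nat → List (List Int) → List Int → List Int → List Int → List Int
  | 0, _, _, ans, _ => ans
  | _+1, _, [], ans, _ => ans
  | fuel+1, table, p :: st, ans, f =>
    let cs := childrenB table p f
    runB fuel table (cs ++ st) (ans ++ cs) (markB f cs)

def count_child_alt (point : Int) (table : List (List Int)) (found : List Int) : List Int :=
  runB (found.length + 1) table [point] [] found

-- ===== PRECONDITION & SPEC =====
-- Pre_ excludes exactly the raising inputs up to a closed-form over-approximation: it demands a
-- valid point index and (for nonempty found) a matrix covering all indices of found even when the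
-- traversal happens to discover no children and A returns [] without touching the missing entries,
-- and A also returns [] for empty found without ever indexing table.
def Pre_count_child (point : Int) (table : List (List Int)) (found : List Int) : Prop :=
  -(table.length : Int) ≤ point ∧ point < (table.length : Int) ∧
  (found = [] ∨ (found.length ≤ table.length ∧ ∀ row ∈ table, found.length ≤ row.length))
instance (point : Int) (table : List (List Int)) (found : List Int) : Decidable (Pre_count_child point table found) := by unfold Pre_count_child; infer_instance

def pvWitness_count_child : Int × List (List Int) × List Int := (0, [[0, 1], [1, 0]], [0, 0])

def Spec_count_child (point : Int) (table : List (List Int)) (found : List Int) (out : List Int) : Prop := out = count_child_alt point table found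
instance (point : Int) (table : List (List Int)) (found : List Int) (out : List Int) : Decidable (Spec_count_child point table found out) := by unfold Spec_count_child; infer_instance

-- ===== CLAIM (what is proved, stated in full; the proofs are below) =====
def Claim_equal_count_child : Prop := ∀ (point : Int) (table : List (List Int)) (found : List Int), Dom_count_child point table found → Pre_count_child point table found → Spec_count_child point table found (count_child point table found)

-- ===== LEMMAS AND PROOFS =====

def pvZeros (f : List Int) : Nat := f.count 0

-- fold of the second loop of A, abstracted over the recursive call g
def pvFR (g : Int → List Int → List Int × List Int) (l : List Int) (a f : List Int) : List Int × List Int :=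
  l.foldl (fun st el => (st.1 ++ (g el st.2).1, (g el st.2).2)) (a, f)

def pvRecA (fuel : Nat) (table : List (List Int)) : Int → List Int → List Int × List Int :=
  fun p f => countChildA fuel p table f

theorem pvFR_nil (g : Int → List Int → List Int × List Int) (a f : List Int) :
    pvFR g [] a f = (a, f) := rfl

theorem pvFR_cons (g : Int → List Int → List Int × List Int) (el : Int) (l : List Int) (a f : List Int) :
    pvFR g (el :: l) a f = pvFR g l (a ++ (g el f).1) (g el f).2 := rfl

theorem pvFR_append (g : Int → List Int → List Int × List Int) (l1 l2 : List Int) (a f : List Int) :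
    pvFR g (l1 ++ l2) a f = pvFR g l2 (pvFR g l1 a f).1 (pvFR g l1 a f).2 := by
  simp [pvFR, List.foldl_append]

theorem pvFR_prefix (g : Int → List Int → List Int × List Int) (l : List Int) (a f : List Int) :
    pvFR g l a f = (a ++ (pvFR g l [] f).1, (pvFR g l [] f).2) := by
  induction l generalizing a f with
  | nil => simp [pvFR_nil]
  | cons el l ih =>
    rw [pvFR_cons, pvFR_cons, ih, ih (([] : List Int) ++ (g el f).1)]
    simp

theorem pvGet_setD_ne (f : List Int) (i j : Int) (hi : 0 ≤ i) (hj : 0 ≤ j) (hne : j ≠ i) :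
    PySem.List.pyGet? (PySem.List.pySetD f i 1) j = PySem.List.pyGet? f j := by
  rw [PySem.List.pySetD_of_nonneg f 1 hi, PySem.List.pyGet?_of_nonneg _ hj,
      PySem.List.pyGet?_of_nonneg _ hj, List.getElem?_set_ne (by omega)]

-- the interleaved first loop of A equals: filter with the ORIGINAL found, then mark all
theorem pvLoopA (table : List (List Int)) (p : Int) (l : List Int) (f ans nps : List Int)
    (hnd : l.Nodup) (hpos : ∀ i ∈ l, 0 ≤ i) :
    l.foldl
      (fun (st : List Int × List Int × List Int) i =>
        if ((PySem.List.pyGet? table p).bind (fun row => PySem.List.pyGet? row i) == some 1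
            && PySem.List.pyGet? st.2.2 i == some 0)
        then (st.1 ++ [i], st.2.1 ++ [i], PySem.List.pySetD st.2.2 i 1)
        else st)
      (ans, nps, f)
    = (ans ++ l.filter (fun i => (PySem.List.pyGet? table p).bind (fun row => PySem.List.pyGet? row i) == some 1
              && PySem.List.pyGet? f i == some 0),
       nps ++ l.filter (fun i => (PySem.List.pyGet? table p).bind (fun row => PySem.List.pyGet? row i) == some 1
              && PySem.List.pyGet? f i == some 0),
       markB f (l.filter (fun i => (PySem.List.pyGet? table p).bind (fun row => PySem.List.pyGet? row i) == some 1
              && PySem.List.pyGet? f i == some 0))) := by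
  induction l generalizing f ans nps with
  | nil => simp [markB]
  | cons i l ih =>
    have hndl : l.Nodup := hnd.of_cons
    have hposl : ∀ j ∈ l, 0 ≤ j := fun j hj => hpos j (List.mem_cons_of_mem _ hj)
    have hinotmem : i ∉ l := (List.nodup_cons.mp hnd).1
    by_cases hc : ((PySem.List.pyGet? table p).bind (fun row => PySem.List.pyGet? row i) == some 1
            && PySem.List.pyGet? f i == some 0) = true
    · have hfilter : l.filter (fun j => (PySem.List.pyGet? table p).bind (fun row => PySem.List.pyGet? row j) == some 1
              && PySem.List.pyGet? (PySem.List.pySetD f i 1) j == some 0)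
          = l.filter (fun j => (PySem.List.pyGet? table p).bind (fun row => PySem.List.pyGet? row j) == some 1
              && PySem.List.pyGet? f j == some 0) := by
        apply List.filter_congr
        intro j hj
        rw [pvGet_setD_ne f i j (hpos i (List.mem_cons_self)) (hposl j hj)
              (by intro h; exact hinotmem (h ▸ hj))]
      rw [List.foldl_cons, if_pos hc, ih _ _ _ hndl hposl, hfilter]
      simp [markB, hc, List.filter_cons]
    · have hc' : ((PySem.List.pyGet? table p).bind (fun row => PySem.List.pyGet? row i) == some 1
            && PySem.List.pyGet? f i == some 0) = false := by
        simpa using hc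
      rw [List.foldl_cons, if_neg (by simp [hc']), ih _ _ _ hndl hposl]
      simp [List.filter_cons, hc']

theorem pvChildren_nonneg (table : List (List Int)) (p : Int) (f : List Int) :
    ∀ c ∈ childrenB table p f, 0 ≤ c := by
  intro c hc
  have := List.mem_of_mem_filter hc
  have := PySem.List.mem_pyRange_one.mp this
  omega

theorem pvChildren_zero (table : List (List Int)) (p : Int) (f : List Int) :
    ∀ c ∈ childrenB table p f, PySem.List.pyGet? f c = some 0 := by
  intro c hc
  have h := List.of_mem_filter hc
  simp only [Bool.and_eq_true, beq_iff_eq] at h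
  exact h.2

theorem pvChildren_nodup (table : List (List Int)) (p : Int) (f : List Int) :
    (childrenB table p f).Nodup :=
  (PySem.List.nodup_pyRange_one _ _).filter _

theorem pvCount_set_nat : ∀ (f : List Int) (n : Nat), f[n]? = some 0 → (f.set n 1).count 0 + 1 = f.count 0 := by
  intro f
  induction f with
  | nil => intro n h; simp at h
  | cons a t ih =>
    intro n h
    cases n with
    | zero =>
      simp at h
      subst h
      simp [List.count_cons]
    | succ m =>
      simp at h
      have := ih m h
      simp [List.count_cons, this]
      omega

theorem pvZeros_setD (f : List Int) (c : Int) (hc : 0 ≤ c) (h : PySem.List.pyGet? f c = some 0) :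
    pvZeros (PySem.List.pySetD f c 1) + 1 = pvZeros f := by
  rw [PySem.List.pyGet?_of_nonneg _ hc] at h
  unfold pvZeros
  rw [PySem.List.pySetD_of_nonneg f 1 hc]
  exact pvCount_set_nat f c.toNat h

theorem pvZeros_markB : ∀ (cs f : List Int), cs.Nodup → (∀ c ∈ cs, 0 ≤ c) →
    (∀ c ∈ cs, PySem.List.pyGet? f c = some 0) →
    pvZeros (markB f cs) + cs.length = pvZeros f := by
  intro cs
  induction cs with
  | nil => intro f _ _ _; simp [markB]
  | cons c cs ih =>
    intro f hnd hpos hz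
    have hc0 : 0 ≤ c := hpos c List.mem_cons_self
    have hstep : pvZeros (PySem.List.pySetD f c 1) + 1 = pvZeros f :=
      pvZeros_setD f c hc0 (hz c List.mem_cons_self)
    have htail : ∀ c' ∈ cs, PySem.List.pyGet? (PySem.List.pySetD f c 1) c' = some 0 := by
      intro c' hc'
      rw [pvGet_setD_ne f c c' hc0 (hpos c' (List.mem_cons_of_mem _ hc'))
            (by intro h; exact (List.nodup_cons.mp hnd).1 (h ▸ hc'))]
      exact hz c' (List.mem_cons_of_mem _ hc')
    have := ih (PySem.List.pySetD f c 1) hnd.of_cons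
      (fun c' hc' => hpos c' (List.mem_cons_of_mem _ hc')) htail
    have hmb : markB f (c :: cs) = markB (PySem.List.pySetD f c 1) cs := rfl
    rw [hmb]
    simp only [List.length_cons]
    omega

theorem pvZeros_children (table : List (List Int)) (p : Int) (f : List Int) :
    pvZeros (markB f (childrenB table p f)) + (childrenB table p f).length = pvZeros f :=
  pvZeros_markB _ f (pvChildren_nodup table p f) (pvChildren_nonneg table p f) (pvChildren_zero table p f)

theorem pvA_succ (fuel : Nat) (table : List (List Int)) (p : Int) (f : List Int) :
    countChildA (fuel+1) p table f
      = pvFR (pvRecA fuel table) (childrenB table p f) (childrenB table p f) (markB f (childrenB table p f)) := by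
  simp only [countChildA]
  rw [pvLoopA table p _ f [] [] (PySem.List.nodup_pyRange_one _ _)
        (by intro i hi; exact (PySem.List.mem_pyRange_one.mp hi).1)]
  rfl

theorem pvFR_zeros (g : Int → List Int → List Int × List Int)
    (hg : ∀ el f', pvZeros ((g el f').2) ≤ pvZeros f') :
    ∀ (l : List Int) (a f : List Int), pvZeros ((pvFR g l a f).2) ≤ pvZeros f := by
  intro l
  induction l with
  | nil => intro a f; simp [pvFR_nil]
  | cons el l ih =>
    intro a f
    rw [pvFR_cons]
    exact le_trans (ih _ _) (hg el f)

theorem pvA_zeros (fuel : Nat) (table : List (List Int)) (p : Int) (f : List Int) :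
    pvZeros ((countChildA fuel p table f).2) ≤ pvZeros f := by
  induction fuel generalizing p f with
  | zero => simp [countChildA]
  | succ k ih =>
    rw [pvA_succ]
    have h1 := pvFR_zeros (pvRecA k table) (fun el f' => ih el f')
      (childrenB table p f) (childrenB table p f) (markB f (childrenB table p f))
    have h2 := pvZeros_children table p f
    omega

theorem pvFR_congr (g1 g2 : Int → List Int → List Int × List Int)
    (hg1z : ∀ el f', pvZeros ((g1 el f').2) ≤ pvZeros f') :
    ∀ (l : List Int) (a f : List Int),
      (∀ el ∈ l, ∀ f', pvZeros f' ≤ pvZeros f → g1 el f' = g2 el f') →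
      pvFR g1 l a f = pvFR g2 l a f := by
  intro l
  induction l with
  | nil => intro a f _; rfl
  | cons el l ih =>
    intro a f h
    have heq : g1 el f = g2 el f := h el List.mem_cons_self f le_rfl
    rw [pvFR_cons, pvFR_cons, heq]
    apply ih
    intro el' hel' f' hf'
    apply h el' (List.mem_cons_of_mem _ hel')
    calc pvZeros f' ≤ pvZeros ((g2 el f).2) := hf'
      _ = pvZeros ((g1 el f).2) := by rw [heq]
      _ ≤ pvZeros f := hg1z el f

theorem pvA_stab_succ (fuel : Nat) : ∀ (table : List (List Int)) (p : Int) (f : List Int),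
    pvZeros f < fuel → countChildA (fuel+1) p table f = countChildA fuel p table f := by
  induction fuel with
  | zero => intro _ _ _ h; omega
  | succ k ih =>
    intro table p f h
    rw [pvA_succ, pvA_succ]
    by_cases hcs : childrenB table p f = []
    · rw [hcs]; rfl
    · apply pvFR_congr _ _ (fun el f' => pvA_zeros (k+1) table el f')
      intro el hel f' hf'
      apply ih
      have hz := pvZeros_children table p f
      have hlen : 1 ≤ (childrenB table p f).length := by
        cases hh : childrenB table p f with
        | nil => exact absurd hh hcs
        | cons x xs => simp [hh]
      omega

theorem pvA_stab_add (table : List (List Int)) (p : Int) (f : List Int) (d F : Nat)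
    (h : pvZeros f < F) : countChildA (F + d) p table f = countChildA F p table f := by
  induction d with
  | zero => rfl
  | succ e ih =>
    have : F + (e + 1) = (F + e) + 1 := by omega
    rw [this, pvA_stab_succ (F + e) table p f (by omega), ih]

theorem pvA_stab (F1 F2 : Nat) (table : List (List Int)) (p : Int) (f : List Int)
    (h1 : pvZeros f < F1) (h2 : pvZeros f < F2) :
    countChildA F1 p table f = countChildA F2 p table f := by
  rcases Nat.le_total F1 F2 with h | h
  · have := pvA_stab_add table p f (F2 - F1) F1 h1
    rw [show F1 + (F2 - F1) = F2 from by omega] at this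
    exact this.symm
  · have := pvA_stab_add table p f (F1 - F2) F2 h2
    rw [show F2 + (F1 - F2) = F1 from by omega] at this
    exact this

theorem pvA_step (F : Nat) (table : List (List Int)) (p : Int) (f : List Int)
    (hF : pvZeros f < F) :
    countChildA F p table f
      = (childrenB table p f ++ (pvFR (pvRecA F table) (childrenB table p f) [] (markB f (childrenB table p f))).1,
         (pvFR (pvRecA F table) (childrenB table p f) [] (markB f (childrenB table p f))).2) := by
  cases F with
  | zero => omega
  | succ F0 =>
    rw [pvA_succ]
    have hswitch : pvFR (pvRecA F0 table) (childrenB table p f) (childrenB table p f) (markB f (childrenB table p f))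
        = pvFR (pvRecA (F0+1) table) (childrenB table p f) (childrenB table p f) (markB f (childrenB table p f)) := by
      by_cases hcs : childrenB table p f = []
      · rw [hcs]; rfl
      · apply pvFR_congr _ _ (fun el f' => pvA_zeros F0 table el f')
        intro el hel f' hf'
        apply pvA_stab
        · have hz := pvZeros_children table p f
          have hlen : 1 ≤ (childrenB table p f).length := by
            cases hh : childrenB table p f with
            | nil => exact absurd hh hcs
            | cons x xs => simp [hh]
          omega
        · have hz := pvZeros_children table p f
          omega
    rw [hswitch, pvFR_prefix]

theorem pvSIM (fuelB : Nat) : ∀ (table : List (List Int)) (st ans f : List Int) (F : Nat),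
    pvZeros f + st.length ≤ fuelB → pvZeros f < F →
    runB fuelB table st ans f = (pvFR (pvRecA F table) st ans f).1 := by
  induction fuelB with
  | zero =>
    intro table st ans f F h hF
    have hst : st = [] := by
      cases st with
      | nil => rfl
      | cons x xs => simp [List.length_cons] at h
    rw [hst]
    rfl
  | succ k ih =>
    intro table st ans f F h hF
    cases st with
    | nil => rfl
    | cons p tl =>
      have hz := pvZeros_children table p f
      rw [show runB (k+1) table (p :: tl) ans f
            = runB k table (childrenB table p f ++ tl) (ans ++ childrenB table p f)
                (markB f (childrenB table p f)) from rfl]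
      rw [ih table _ _ _ F
            (by simp only [List.length_append, List.length_cons] at h ⊢; omega) (by omega)]
      rw [pvFR_append, pvFR_cons]
      have hstep : pvRecA F table p f
          = (childrenB table p f ++ (pvFR (pvRecA F table) (childrenB table p f) [] (markB f (childrenB table p f))).1,
             (pvFR (pvRecA F table) (childrenB table p f) [] (markB f (childrenB table p f))).2) :=
        pvA_step F table p f hF
      rw [hstep, pvFR_prefix (pvRecA F table) (childrenB table p f) (ans ++ childrenB table p f)]
      simp [List.append_assoc]

-- ===== VERDICT (by name: the statement is the Claim_ definition above) =====
theorem count_child_spec : Claim_equal_count_child := by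
  unfold Claim_equal_count_child
  intro point table found _ _
  unfold Spec_count_child count_child count_child_alt
  have hz : pvZeros found ≤ found.length := List.count_le_length
  rw [pvSIM (found.length + 1) table [point] [] found (found.length + 1)
        (by simp; omega) (by omega)]
  rw [pvFR_cons, pvFR_nil]
  rfl
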